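-- pv_equiv track=rewrite | github.com/26samaahmed/lc_solutions | leetcode/1608e.py | specialArray
-- ===== SOURCE A (Python) =====
-- def specialArray(nums):
--     """
--     :type nums: List[int]
--     :rtype: int
--     """
--     counter = 0
--     for x in range(len(nums) + 1):
--         for i in nums:
--             if i >= x:
--                 counter += 1
--         if counter == x:
--             return counter
--         else:
--             counter = 0
--     if counter == 0:
--         return -1
-- ===== SOURCE B (Python) =====
-- def specialArray(nums):
--     # Sort descending once; x counts the leading elements with value > index.
--     # The loop stops at the first element v with v <= x: then x is special
--     # iff v < x (so no element beyond the prefix is >= x). O(n log n).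
--     x = 0
--     for v in sorted(nums, reverse=True):
--         if v <= x:
--             return x if v < x else -1
--         x += 1
--     return x
-- ===== Notes on version B (the rewrite author's own statement) =====
-- stated objective: faster
-- what changed: Replaces the quadratic scan over all candidates x (recounting the whole list for each x) by one descending sort followed by a single linear prefix scan.
import Mathlib
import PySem

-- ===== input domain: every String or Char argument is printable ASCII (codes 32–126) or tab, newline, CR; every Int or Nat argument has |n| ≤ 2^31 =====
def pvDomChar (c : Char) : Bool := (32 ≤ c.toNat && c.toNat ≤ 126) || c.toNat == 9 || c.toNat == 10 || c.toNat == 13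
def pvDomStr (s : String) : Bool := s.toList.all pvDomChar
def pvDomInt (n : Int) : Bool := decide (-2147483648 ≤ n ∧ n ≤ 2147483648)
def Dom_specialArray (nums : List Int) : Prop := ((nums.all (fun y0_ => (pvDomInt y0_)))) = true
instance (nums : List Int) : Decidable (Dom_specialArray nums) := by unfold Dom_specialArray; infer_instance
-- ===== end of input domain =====

-- B is faster by a different algorithm: one descending sort plus a single linear scan
-- instead of recounting the whole list for every candidate x.

-- ===== PORT A =====
-- outer loop over range(len(nums)+1); counter threaded exactly as in A (reset to 0 when no return)
def goA (nums : List Int) (xs : List Int) (counter : Int) : Option Int :=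
  match xs with
  | [] => if counter = 0 then some (-1) else none
  | x :: rest =>
    let c := nums.foldl (fun acc i => if i ≥ x then acc + 1 else acc) counter
    if c = x then some c else goA nums rest 0

def specialArray (nums : List Int) : Option Int :=
  goA nums (PySem.List.pyRange 0 ((nums.length : Int) + 1) 1) 0

-- ===== PORT B =====
-- the for-loop of Source B over the sorted list, with early return
def goB : List Int → Int → Int
  | [], x => x
  | v :: rest, x => if v ≤ x then (if v < x then x else -1) else goB rest (x + 1)

def specialArray_alt (nums : List Int) : Option Int :=
  some (goB (PySem.List.sorted nums (fun y => y) true) 0)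

-- ===== PRECONDITION & SPEC =====
def Spec_specialArray (nums : List Int) (out : Option Int) : Prop := out = specialArray_alt nums
instance (nums : List Int) (out : Option Int) : Decidable (Spec_specialArray nums out) := by unfold Spec_specialArray; infer_instance

-- ===== CLAIM (what is proved, stated in full; the proofs are below) =====
def Claim_equal_specialArray : Prop := ∀ (nums : List Int), Dom_specialArray nums → Spec_specialArray nums (specialArray nums)

-- ===== LEMMAS AND PROOFS =====

/-- number of elements of `s` that are `≥ y`, as an `Int` -/
def cntI (s : List Int) (y : Int) : Int := (s.countP (fun i => decide (y ≤ i)) : Int)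

/-- first `y` in `xs` with `a + cntI s y = y`, else `-1` -/
def F (s : List Int) (a : Int) : List Int → Int
  | [] => -1
  | y :: rest => if a + cntI s y = y then y else F s a rest

theorem cntI_nil (y : Int) : cntI [] y = 0 := rfl

theorem cntI_cons (v : Int) (rest : List Int) (y : Int) :
    cntI (v :: rest) y = (if y ≤ v then 1 else 0) + cntI rest y := by
  by_cases h : y ≤ v <;> simp [cntI, h] <;> omega

theorem cntI_nonneg (s : List Int) (y : Int) : 0 ≤ cntI s y := by
  unfold cntI
  exact Int.natCast_nonneg _

theorem cntI_eq_zero (s : List Int) (y : Int) (h : ∀ i ∈ s, i < y) : cntI s y = 0 := by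
  unfold cntI
  have h0 : s.countP (fun i => decide (y ≤ i)) = 0 := by
    rw [List.countP_eq_zero]
    intro i hi
    simpa using not_le.mpr (h i hi)
  simp [h0]

theorem cntI_perm (s t : List Int) (hp : s.Perm t) (y : Int) : cntI s y = cntI t y := by
  simp [cntI, hp.countP_eq]

theorem goA_eq_F (nums : List Int) (xs : List Int) :
    goA nums xs 0 = some (F nums 0 xs) := by
  induction xs with
  | nil => simp [goA, F]
  | cons y rest ih =>
    simp only [goA, F]
    have hc : nums.foldl (fun acc i => if i ≥ y then acc + 1 else acc) (0 : Int)
        = 0 + cntI nums y := by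
      simpa [cntI, ge_iff_le] using
        PySem.List.foldl_if_add_one (fun i => decide (y ≤ i)) nums (0 : Int)
    rw [hc]
    split_ifs with h
    · simp [h]
    · exact ih

theorem F_congr (s s' : List Int) (a a' : Int) (xs : List Int)
    (h : ∀ y ∈ xs, (a + cntI s y = y) ↔ (a' + cntI s' y = y)) :
    F s a xs = F s' a' xs := by
  induction xs with
  | nil => rfl
  | cons y rest ih =>
    simp only [F]
    have hy := h y (by simp)
    by_cases hc : a + cntI s y = y
    · simp [hc, hy.mp hc]
    · have hc' : ¬ (a' + cntI s' y = y) := fun hh => hc (hy.mpr hh)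
      simp [hc, hc']
      exact ih (fun z hz => h z (by simp [hz]))

theorem F_none (s : List Int) (a : Int) (xs : List Int)
    (h : ∀ y ∈ xs, ¬ (a + cntI s y = y)) : F s a xs = -1 := by
  induction xs with
  | nil => rfl
  | cons y rest ih =>
    simp only [F]
    rw [if_neg (h y (by simp))]
    exact ih (fun z hz => h z (by simp [hz]))

theorem goB_eq_F (s : List Int) (hs : s.Pairwise (fun a b => b ≤ a)) (x : Int) :
    goB s x = F s x (PySem.List.pyRange x (x + (s.length : Int) + 1) 1) := by
  induction s generalizing x with
  | nil =>
    simp only [goB, List.length_nil, Int.natCast_zero, add_zero]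
    rw [PySem.List.pyRange_one_singleton]
    simp [F, cntI_nil]
  | cons v rest ih =>
    have hv : ∀ i ∈ rest, i ≤ v := by
      intro i hi; exact (List.pairwise_cons.mp hs).1 i hi
    have hrest := (List.pairwise_cons.mp hs).2
    have hlen : x + ((v :: rest).length : Int) + 1 = (x + 1) + (rest.length : Int) + 1 := by
      simp; ring
    have hcons : PySem.List.pyRange x (x + ((v :: rest).length : Int) + 1) 1
        = x :: PySem.List.pyRange (x + 1) ((x + 1) + (rest.length : Int) + 1) 1 := by
      rw [PySem.List.pyRange_one_cons (by simp; omega), hlen]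
    rw [hcons]
    simp only [F]
    by_cases hvx : v ≤ x
    · by_cases hlt : v < x
      · -- all elements < x, count 0, head matches
        have h0 : cntI (v :: rest) x = 0 := by
          apply cntI_eq_zero
          intro i hi
          rcases List.mem_cons.mp hi with h | h
          · omega
          · have := hv i h; omega
        simp [goB, hvx, hlt, h0]
      · -- v = x: head fails, every later y fails too
        have hvx' : v = x := le_antisymm hvx (not_lt.mp hlt)
        have hhead : ¬ (x + cntI (v :: rest) x = x) := by
          rw [cntI_cons]
          have := cntI_nonneg rest x
          simp [hvx'.ge]
          omega
        rw [if_neg hhead]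
        have : F (v :: rest) x (PySem.List.pyRange (x + 1) ((x + 1) + (rest.length : Int) + 1) 1) = -1 := by
          apply F_none
          intro y hy
          have hy' : x + 1 ≤ y := (PySem.List.mem_pyRange_one.mp hy).1
          have h0 : cntI (v :: rest) y = 0 := by
            apply cntI_eq_zero
            intro i hi
            rcases List.mem_cons.mp hi with h | h
            · omega
            · have := hv i h; omega
          rw [h0]; omega
        rw [this]
        simp [goB, hvx, hlt]
    · -- v > x: head fails, tail matches the recursive call on rest via F_congr
      push Not at hvx
      have hhead : ¬ (x + cntI (v :: rest) x = x) := by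
        rw [cntI_cons]
        have := cntI_nonneg rest x
        rw [if_pos hvx.le]
        omega
      rw [if_neg hhead]
      have hgoB : goB (v :: rest) x = goB rest (x + 1) := by
        simp [goB]; omega
      rw [hgoB, ih hrest (x + 1)]
      apply F_congr
      intro y hy
      have hy' : x + 1 ≤ y := (PySem.List.mem_pyRange_one.mp hy).1
      rw [cntI_cons]
      by_cases hyv : y ≤ v
      · rw [if_pos hyv]; constructor <;> intro <;> omega
      · rw [if_neg hyv]
        push Not at hyv
        have h0 : cntI rest y = 0 := by
          apply cntI_eq_zero
          intro i hi
          have := hv i hi; omega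
        rw [h0]
        constructor <;> intro <;> omega

-- ===== VERDICT (by name: the statement is the Claim_ definition above) =====
theorem specialArray_spec : Claim_equal_specialArray := by
  intro nums _
  unfold Spec_specialArray specialArray specialArray_alt
  set s := PySem.List.sorted nums (fun y => y) true with hs
  have hperm : s.Perm nums := PySem.List.sorted_perm nums (fun y => y) true
  have hpair : s.Pairwise (fun a b => b ≤ a) := by
    simpa using PySem.List.sorted_pairwise_rev nums (fun y => y)
  rw [goA_eq_F]
  have hlen : (nums.length : Int) = (s.length : Int) := by
    rw [hperm.length_eq]
  rw [goB_eq_F s hpair 0]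
  congr 1
  rw [show (0 : Int) + (s.length : Int) + 1 = (nums.length : Int) + 1 by omega]
  apply F_congr
  intro y _
  rw [cntI_perm s nums hperm]
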